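-- pv_equiv track=rewrite | github.com/polinasand/university | parcs/solution.py | f
-- ===== SOURCE A (Python) =====
-- def f(w, b):
--   res = [0, 0, 0]
--   for t in range(3):
--     for i in range(len(w)):
--       for j in range(len(w[0])):
--
--         res[t] += w[i][j][t]*b[i][j]
--
--   for t in range(3):
--     res[t] %= 256
--
--   return tuple(res)
-- ===== SOURCE B (Python) =====
-- def f(w, b):
--   # recurse over the structure instead of index loops: each cell contributes once,
--   # the three channel sums are built as tuples back-to-front
--   if not w or not w[0]:
--     return (0, 0, 0)
--   m = len(w[0])
--
--   def row(cs, ps):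
--     # dot product of weight triples with pixels, paired head-to-head
--     if not cs or not ps:
--       return (0, 0, 0)
--     s0, s1, s2 = row(cs[1:], ps[1:])
--     c, p = cs[0], ps[0]
--     return (s0 + c[0] * p, s1 + c[1] * p, s2 + c[2] * p)
--
--   def grid(rows, pix):
--     if not rows:
--       return (0, 0, 0)
--     a0, a1, a2 = row(rows[0][:m], pix[0][:m])
--     s0, s1, s2 = grid(rows[1:], pix[1:])
--     return (a0 + s0, a1 + s1, a2 + s2)
--
--   s = grid(w, b)
--   return tuple(x % 256 for x in s)
-- ===== Notes on version B (the rewrite author's own statement) =====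
-- stated objective: alternative
-- what changed: replaces A's three index-driven passes that mutate a result list with a structural recursion over rows and cells (slicing/zip-style truncation, no indices) that builds the three channel sums as tuples back-to-front in one traversal
import Mathlib
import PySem

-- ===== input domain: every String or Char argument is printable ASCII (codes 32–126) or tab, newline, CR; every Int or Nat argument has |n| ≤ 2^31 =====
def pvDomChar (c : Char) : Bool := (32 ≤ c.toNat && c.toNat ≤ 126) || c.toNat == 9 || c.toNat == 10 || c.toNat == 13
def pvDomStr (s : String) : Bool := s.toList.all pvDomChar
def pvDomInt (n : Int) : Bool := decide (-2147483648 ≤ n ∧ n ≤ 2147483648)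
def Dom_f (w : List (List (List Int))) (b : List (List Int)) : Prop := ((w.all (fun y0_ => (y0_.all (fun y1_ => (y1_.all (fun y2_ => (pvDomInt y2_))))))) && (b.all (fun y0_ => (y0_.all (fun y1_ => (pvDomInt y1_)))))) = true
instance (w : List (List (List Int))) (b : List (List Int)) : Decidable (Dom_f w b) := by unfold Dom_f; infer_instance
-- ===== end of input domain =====

-- B replaces A's three index-driven passes mutating a result list with a structural
-- recursion over rows and cells building the three channel sums as tuples (objective:
-- alternative decomposition). Indexing is in range under Pre_f, so getD defaults are never hit.

-- ===== PORT A =====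
-- res[t] read/write on the triple state (res is the Python 3-element list)
def getT (r : Int × Int × Int) (t : Nat) : Int :=
  if t = 0 then r.1 else if t = 1 then r.2.1 else r.2.2
def setT (r : Int × Int × Int) (t : Nat) (v : Int) : Int × Int × Int :=
  if t = 0 then (v, r.2.1, r.2.2) else if t = 1 then (r.1, v, r.2.2) else (r.1, r.2.1, v)

def f (w : List (List (List Int))) (b : List (List Int)) : Int × Int × Int :=
  let res : Int × Int × Int := (0, 0, 0)
  let res := (List.range 3).foldl (fun res t =>
    (List.range w.length).foldl (fun res i =>
      (List.range (w.headD []).length).foldl (fun res j =>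
        setT res t (getT res t +
          ((w.getD i []).getD j []).getD t 0 * (b.getD i []).getD j 0)) res) res) res
  (PySem.Int.mod res.1 256, PySem.Int.mod res.2.1 256, PySem.Int.mod res.2.2 256)

-- ===== PORT B =====
-- row(cs, ps): recursion pairing cs, ps head-to-head, stopping at the shorter
def rowB : List (List Int) → List Int → Int × Int × Int
  | [], _ => (0, 0, 0)
  | _ :: _, [] => (0, 0, 0)
  | c :: cs, p :: ps =>
    let s := rowB cs ps
    (s.1 + c.getD 0 0 * p, s.2.1 + c.getD 1 0 * p, s.2.2 + c.getD 2 0 * p)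

-- grid(rows, pix): structural recursion over the rows; Python's xs[:m] (m ≥ 0) is List.take m
def gridB (m : Nat) : List (List (List Int)) → List (List Int) → Int × Int × Int
  | [], _ => (0, 0, 0)
  | r :: rows, pix =>
    let a := rowB (r.take m) ((pix.headD []).take m)
    let s := gridB m rows (pix.drop 1)
    (a.1 + s.1, a.2.1 + s.2.1, a.2.2 + s.2.2)

def f_alt (w : List (List (List Int))) (b : List (List Int)) : Int × Int × Int :=
  if w = [] ∨ w.headD [] = [] then (0, 0, 0)
  else
    let m := (w.headD []).length
    let s := gridB m w b
    (PySem.Int.mod s.1 256, PySem.Int.mod s.2.1 256, PySem.Int.mod s.2.2 256)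

-- ===== PRECONDITION & SPEC =====
-- Pre_f excludes exactly the inputs on which the Python A raises IndexError:
-- first weight row nonempty and (fewer pixel rows than weight rows, a weight/pixel
-- row shorter than the first weight row, or a weight cell with fewer than 3 channels);
-- when the first weight row is empty the loop bodies never run and A always returns.
def Pre_f (w : List (List (List Int))) (b : List (List Int)) : Prop :=
  (w.headD []).length = 0 ∨
  w.length ≤ b.length ∧
  ∀ i < w.length,
    (w.headD []).length ≤ (w.getD i []).length ∧
    (w.headD []).length ≤ (b.getD i []).length ∧
    ∀ j < (w.headD []).length, 3 ≤ ((w.getD i []).getD j []).length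
instance (w : List (List (List Int))) (b : List (List Int)) : Decidable (Pre_f w b) := by
  unfold Pre_f; infer_instance

def pvWitness_f : List (List (List Int)) × List (List Int) := ([[[1, 2, 3]]], [[5]])

def Spec_f (w : List (List (List Int))) (b : List (List Int)) (out : Int × Int × Int) : Prop := out = f_alt w b
instance (w : List (List (List Int))) (b : List (List Int)) (out : Int × Int × Int) : Decidable (Spec_f w b out) := by unfold Spec_f; infer_instance

-- ===== CLAIM (what is proved, stated in full; the proofs are below) =====
def Claim_equal_f : Prop := ∀ (w : List (List (List Int))) (b : List (List Int)), Dom_f w b → Pre_f w b → Spec_f w b (f w b)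

-- ===== LEMMAS AND PROOFS =====

-- channel-t sum, the common normal form of both ports (proof helper only)
def chan (w : List (List (List Int))) (b : List (List Int)) (t : Nat) : Int :=
  (List.range w.length).foldl (fun acc i =>
    (List.range (w.headD []).length).foldl (fun acc j =>
      acc + ((w.getD i []).getD j []).getD t 0 * (b.getD i []).getD j 0) acc) 0

-- inner (per-row) channel-t sum
def T (r : List (List Int)) (p : List Int) (m : Nat) (t : Nat) : Int :=
  ((List.range m).map (fun j => (r.getD j []).getD t 0 * p.getD j 0)).sum

theorem foldl_comp0 {a : Type} (l : List a)
    (S : Int × Int × Int → a → Int × Int × Int) (g : Int → a → Int)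
    (h : ∀ r x, S r x = (g r.1 x, r.2.1, r.2.2)) (r : Int × Int × Int) :
    l.foldl S r = (l.foldl g r.1, r.2.1, r.2.2) := by
  induction l generalizing r with
  | nil => rfl
  | cons x xs ih => simp only [List.foldl]; rw [ih, h]

theorem foldl_comp1 {a : Type} (l : List a)
    (S : Int × Int × Int → a → Int × Int × Int) (g : Int → a → Int)
    (h : ∀ r x, S r x = (r.1, g r.2.1 x, r.2.2)) (r : Int × Int × Int) :
    l.foldl S r = (r.1, l.foldl g r.2.1, r.2.2) := by
  induction l generalizing r with
  | nil => rfl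
  | cons x xs ih => simp only [List.foldl]; rw [ih, h]

theorem foldl_comp2 {a : Type} (l : List a)
    (S : Int × Int × Int → a → Int × Int × Int) (g : Int → a → Int)
    (h : ∀ r x, S r x = (r.1, r.2.1, g r.2.2 x)) (r : Int × Int × Int) :
    l.foldl S r = (r.1, r.2.1, l.foldl g r.2.2) := by
  induction l generalizing r with
  | nil => rfl
  | cons x xs ih => simp only [List.foldl]; rw [ih, h]

theorem f_eq_chan (w : List (List (List Int))) (b : List (List Int)) :
    f w b = (PySem.Int.mod (chan w b 0) 256, PySem.Int.mod (chan w b 1) 256,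
             PySem.Int.mod (chan w b 2) 256) := by
  have h0 : ∀ r : Int × Int × Int,
      (List.range w.length).foldl (fun res i =>
        (List.range (w.headD []).length).foldl (fun res j =>
          setT res 0 (getT res 0 +
            ((w.getD i []).getD j []).getD 0 0 * (b.getD i []).getD j 0)) res) r
      = ((List.range w.length).foldl (fun acc i =>
          (List.range (w.headD []).length).foldl (fun acc j =>
            acc + ((w.getD i []).getD j []).getD 0 0 * (b.getD i []).getD j 0) acc) r.1,
         r.2.1, r.2.2) :=
    fun r => foldl_comp0 _ _ _
      (fun r i => foldl_comp0 _
        (fun res j => setT res 0 (getT res 0 +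
          ((w.getD i []).getD j []).getD 0 0 * (b.getD i []).getD j 0))
        (fun acc j => acc + ((w.getD i []).getD j []).getD 0 0 * (b.getD i []).getD j 0)
        (fun r j => rfl) r) r
  have h1 : ∀ r : Int × Int × Int,
      (List.range w.length).foldl (fun res i =>
        (List.range (w.headD []).length).foldl (fun res j =>
          setT res 1 (getT res 1 +
            ((w.getD i []).getD j []).getD 1 0 * (b.getD i []).getD j 0)) res) r
      = (r.1,
         (List.range w.length).foldl (fun acc i =>
          (List.range (w.headD []).length).foldl (fun acc j =>
            acc + ((w.getD i []).getD j []).getD 1 0 * (b.getD i []).getD j 0) acc) r.2.1,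
         r.2.2) :=
    fun r => foldl_comp1 _ _ _
      (fun r i => foldl_comp1 _
        (fun res j => setT res 1 (getT res 1 +
          ((w.getD i []).getD j []).getD 1 0 * (b.getD i []).getD j 0))
        (fun acc j => acc + ((w.getD i []).getD j []).getD 1 0 * (b.getD i []).getD j 0)
        (fun r j => rfl) r) r
  have h2 : ∀ r : Int × Int × Int,
      (List.range w.length).foldl (fun res i =>
        (List.range (w.headD []).length).foldl (fun res j =>
          setT res 2 (getT res 2 +
            ((w.getD i []).getD j []).getD 2 0 * (b.getD i []).getD j 0)) res) r
      = (r.1, r.2.1,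
         (List.range w.length).foldl (fun acc i =>
          (List.range (w.headD []).length).foldl (fun acc j =>
            acc + ((w.getD i []).getD j []).getD 2 0 * (b.getD i []).getD j 0) acc) r.2.2) :=
    fun r => foldl_comp2 _ _ _
      (fun r i => foldl_comp2 _
        (fun res j => setT res 2 (getT res 2 +
          ((w.getD i []).getD j []).getD 2 0 * (b.getD i []).getD j 0))
        (fun acc j => acc + ((w.getD i []).getD j []).getD 2 0 * (b.getD i []).getD j 0)
        (fun r j => rfl) r) r
  show ((fun res : Int × Int × Int =>
      (PySem.Int.mod res.1 256, PySem.Int.mod res.2.1 256, PySem.Int.mod res.2.2 256))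
      ((List.range 3).foldl _ (0, 0, 0))) = _
  have h3 : List.range 3 = [0, 1, 2] := rfl
  rw [h3]
  simp only [List.foldl]
  rw [h0, h1, h2]
  rfl

theorem foldl_add_sum (l : List Nat) (g : Nat → Int) (a : Int) :
    l.foldl (fun acc x => acc + g x) a = a + (l.map g).sum := by
  induction l generalizing a with
  | nil => simp
  | cons x xs ih => simp [List.foldl, ih, add_assoc]

theorem chan_eq (w : List (List (List Int))) (b : List (List Int)) (t : Nat) :
    chan w b t = ((List.range w.length).map
      (fun i => T (w.getD i []) (b.getD i []) (w.headD []).length t)).sum := by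
  unfold chan
  have hstep : (fun (acc : Int) (i : Nat) =>
      (List.range (w.headD []).length).foldl (fun acc j =>
        acc + ((w.getD i []).getD j []).getD t 0 * (b.getD i []).getD j 0) acc)
      = fun acc i => acc + T (w.getD i []) (b.getD i []) (w.headD []).length t := by
    funext acc i
    exact foldl_add_sum _ _ _
  rw [hstep, foldl_add_sum]
  simp

theorem T_left_nil (p : List Int) (m t : Nat) : T [] p m t = 0 := by
  simp [T]

theorem T_right_nil (r : List (List Int)) (m t : Nat) : T r [] m t = 0 := by
  simp [T]

theorem T_succ (c : List Int) (r : List (List Int)) (q : Int) (p : List Int) (m t : Nat) :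
    T (c :: r) (q :: p) (m + 1) t = c.getD t 0 * q + T r p m t := by
  simp only [T, List.range_succ_eq_map, List.map_cons, List.sum_cons, List.map_map,
    Function.comp_def, List.getD_cons_zero, List.getD_cons_succ]

theorem row_main (m : Nat) :
    ∀ (r : List (List Int)) (p : List Int),
      rowB (r.take m) (p.take m) = (T r p m 0, T r p m 1, T r p m 2) := by
  induction m with
  | zero => intro r p; simp [rowB, T]
  | succ m ih =>
    intro r p
    cases r with
    | nil => simp [rowB, T_left_nil]
    | cons c r' =>
      cases p with
      | nil => simp [rowB, T_right_nil]
      | cons q p' =>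
        simp only [List.take_succ_cons, rowB, ih r' p', T_succ, Prod.mk.injEq]
        exact ⟨add_comm _ _, add_comm _ _, add_comm _ _⟩

theorem grid_main (m : Nat) :
    ∀ (rows : List (List (List Int))) (pix : List (List Int)),
      gridB m rows pix =
        (((List.range rows.length).map (fun i => T (rows.getD i []) (pix.getD i []) m 0)).sum,
         ((List.range rows.length).map (fun i => T (rows.getD i []) (pix.getD i []) m 1)).sum,
         ((List.range rows.length).map (fun i => T (rows.getD i []) (pix.getD i []) m 2)).sum) := by
  intro rows
  induction rows with
  | nil => intro pix; simp [gridB]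
  | cons r rows ih =>
    intro pix
    have hhead : pix.headD [] = pix.getD 0 [] := by cases pix <;> rfl
    have hdrop : ∀ i : Nat, (pix.drop 1).getD i [] = pix.getD (i + 1) [] := by
      intro i; cases pix <;> simp [List.getD]
    simp only [gridB, ih (pix.drop 1), row_main m, hhead, hdrop,
      List.length_cons, List.range_succ_eq_map, List.map_cons, List.sum_cons,
      List.map_map, Function.comp_def, List.getD_cons_zero, List.getD_cons_succ]

theorem f_alt_eq_chan (w : List (List (List Int))) (b : List (List Int)) :
    f_alt w b = (PySem.Int.mod (chan w b 0) 256, PySem.Int.mod (chan w b 1) 256,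
             PySem.Int.mod (chan w b 2) 256) := by
  unfold f_alt
  split_ifs with h
  · have hchan : ∀ t, chan w b t = 0 := by
      intro t
      rw [chan_eq]
      rcases h with h | h
      · subst h; rfl
      · rw [h]
        refine List.sum_eq_zero ?_
        intro x hx
        obtain ⟨i, -, rfl⟩ := List.mem_map.mp hx
        rfl
    simp only [hchan]
    decide
  · show (PySem.Int.mod (gridB (w.headD []).length w b).1 256,
          PySem.Int.mod (gridB (w.headD []).length w b).2.1 256,
          PySem.Int.mod (gridB (w.headD []).length w b).2.2 256) = _
    rw [grid_main, chan_eq w b 0, chan_eq w b 1, chan_eq w b 2]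

-- ===== VERDICT (by name: the statement is the Claim_ definition above) =====
theorem f_spec : Claim_equal_f := by
  intro w b _ _
  unfold Spec_f
  rw [f_eq_chan, f_alt_eq_chan]
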